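-- pv_equiv track=rewrite | github.com/wjamhoury/huntboard | backend/app/services/candidate_profile.py | calculate_title_alignment_score
-- ===== SOURCE A (Python) =====
-- def calculate_title_alignment_score(job_title: str) -> int:
--     """
--     Score how well a job title aligns with target titles.
--     Returns 0-25 (component of total 100-point score).
--     """
--     title_lower = job_title.lower()
--
--     # Exact match with primary targets
--     primary_titles = [
--         "solutions engineer", "sales engineer", "solutions architect",
--         "partner solutions architect", "partner solutions engineer",
--         "technical enablement manager",
--     ]
--     for t in primary_titles:
--         if t in title_lower:
--             return 25
--
--     # Strong match with secondary targets
--     secondary_titles = [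
--         "pre-sales", "presales", "customer engineer", "field engineer",
--         "sales enablement", "customer success architect",
--         "technical account manager", "demo engineer",
--     ]
--     for t in secondary_titles:
--         if t in title_lower:
--             return 20
--
--     # Partial match
--     partial_titles = [
--         "solutions", "enablement", "partner engineer", "overlay",
--         "sales consultant", "systems engineer",
--     ]
--     for t in partial_titles:
--         if t in title_lower:
--             return 12
--
--     return 0
-- ===== SOURCE B (Python) =====
-- _KEYWORDS = [
--     ("solutions engineer", 25), ("sales engineer", 25), ("solutions architect", 25),
--     ("partner solutions architect", 25), ("partner solutions engineer", 25),
--     ("technical enablement manager", 25),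
--     ("pre-sales", 20), ("presales", 20), ("customer engineer", 20),
--     ("field engineer", 20), ("sales enablement", 20),
--     ("customer success architect", 20), ("technical account manager", 20),
--     ("demo engineer", 20),
--     ("solutions", 12), ("enablement", 12), ("partner engineer", 12),
--     ("overlay", 12), ("sales consultant", 12), ("systems engineer", 12),
-- ]
--
--
-- def calculate_title_alignment_score(job_title: str) -> int:
--     """Single left-to-right position scan over the lowered title with a
--     best-score accumulator: at each position, any keyword starting there
--     can raise the score.  No `in` substring operator, no per-tier loops."""
--     t = job_title.lower()
--     best = 0
--     for i in range(len(t)):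
--         for kw, score in _KEYWORDS:
--             if score > best and t.startswith(kw, i):
--                 best = score
--     return best
-- ===== Notes on version B (the rewrite author's own statement) =====
-- stated objective: alternative
-- what changed: Replaces A's three per-tier first-hit substring loops (using the 'in' operator) by a single left-to-right position scan over the lowered title with a best-score accumulator, testing at each position which keywords of one flat (keyword, score) table start there.
import Mathlib
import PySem

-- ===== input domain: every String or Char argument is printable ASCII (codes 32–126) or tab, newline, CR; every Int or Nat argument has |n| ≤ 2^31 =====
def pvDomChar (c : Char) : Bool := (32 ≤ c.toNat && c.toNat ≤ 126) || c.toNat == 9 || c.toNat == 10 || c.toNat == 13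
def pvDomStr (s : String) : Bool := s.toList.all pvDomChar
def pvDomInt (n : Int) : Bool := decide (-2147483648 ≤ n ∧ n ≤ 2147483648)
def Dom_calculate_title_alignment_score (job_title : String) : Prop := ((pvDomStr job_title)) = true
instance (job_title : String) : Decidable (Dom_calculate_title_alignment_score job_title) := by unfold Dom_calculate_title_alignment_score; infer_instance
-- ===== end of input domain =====

-- B replaces A's three per-tier first-hit substring loops by a single left-to-right
-- position scan with a best-score accumulator over one flat keyword table (alternative decomposition, same cost class).

-- ===== PORT A =====
def pvPrimary : List String :=
  ["solutions engineer", "sales engineer", "solutions architect",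
   "partner solutions architect", "partner solutions engineer",
   "technical enablement manager"]

def pvSecondary : List String :=
  ["pre-sales", "presales", "customer engineer", "field engineer",
   "sales enablement", "customer success architect",
   "technical account manager", "demo engineer"]

def pvPartial : List String :=
  ["solutions", "enablement", "partner engineer", "overlay",
   "sales consultant", "systems engineer"]

-- A's 'for t in titles: if t in title_lower: return K' loop: first hit wins
def pvLoopHit : List String → String → Bool
  | [], _ => false
  | t :: rest, s => if PySem.Str.isIn t s then true else pvLoopHit rest s

def calculate_title_alignment_score (job_title : String) : Int :=
  let title_lower := PySem.Str.lower job_title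
  if pvLoopHit pvPrimary title_lower then 25
  else if pvLoopHit pvSecondary title_lower then 20
  else if pvLoopHit pvPartial title_lower then 12
  else 0

-- ===== PORT B =====
-- the flat _KEYWORDS table of Source B, keywords as char lists
def pvKeywords : List (List Char × Int) :=
  [("solutions engineer".toList, 25), ("sales engineer".toList, 25),
   ("solutions architect".toList, 25), ("partner solutions architect".toList, 25),
   ("partner solutions engineer".toList, 25), ("technical enablement manager".toList, 25),
   ("pre-sales".toList, 20), ("presales".toList, 20), ("customer engineer".toList, 20),
   ("field engineer".toList, 20), ("sales enablement".toList, 20),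
   ("customer success architect".toList, 20), ("technical account manager".toList, 20),
   ("demo engineer".toList, 20),
   ("solutions".toList, 12), ("enablement".toList, 12), ("partner engineer".toList, 12),
   ("overlay".toList, 12), ("sales consultant".toList, 12), ("systems engineer".toList, 12)]

-- Source B: t = job_title.lower(); best = 0; for i in range(len(t)): for kw, score in _KEYWORDS:
--       if score > best and t.startswith(kw, i): best = score; return best.
-- 't.startswith(kw, i)' is ported as a prefix test on t.drop i — exact since i ∈ range(len(t)) is a Nat.
def calculate_title_alignment_score_alt (job_title : String) : Int :=
  let t := PySem.Chars.lower job_title.toList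
  (List.range t.length).foldl
    (fun best i =>
      pvKeywords.foldl
        (fun best p =>
          if p.2 > best && PySem.Chars.startswith (t.drop i) p.1 then p.2 else best)
        best)
    0

-- ===== PRECONDITION & SPEC =====
def Spec_calculate_title_alignment_score (job_title : String) (out : Int) : Prop := out = calculate_title_alignment_score_alt job_title
instance (job_title : String) (out : Int) : Decidable (Spec_calculate_title_alignment_score job_title out) := by unfold Spec_calculate_title_alignment_score; infer_instance

-- ===== CLAIM (what is proved, stated in full; the proofs are below) =====
def Claim_equal_calculate_title_alignment_score : Prop := ∀ (job_title : String), Dom_calculate_title_alignment_score job_title → Spec_calculate_title_alignment_score job_title (calculate_title_alignment_score job_title)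

-- ===== LEMMAS AND PROOFS =====

-- the list of scores matched somewhere in t (positions outer, keywords inner, like B's loops)
def pvMatched (t : List Char) : List Int :=
  (List.range t.length).flatMap
    (fun i => (pvKeywords.filter (fun p => PySem.Chars.startswith (t.drop i) p.1)).map (·.2))

-- B's inner loop is a fold of max over the scores of the keywords matching at i
theorem pvInner_eq_max (t : List Char) (i : Nat) (L : List (List Char × Int)) (b : Int) :
    L.foldl (fun best p => if p.2 > best && PySem.Chars.startswith (t.drop i) p.1 then p.2 else best) b
      = ((L.filter (fun p => PySem.Chars.startswith (t.drop i) p.1)).map (·.2)).foldl max b := by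
  induction L generalizing b with
  | nil => rfl
  | cons p L ih =>
    by_cases h : PySem.Chars.startswith (t.drop i) p.1 = true
    · simp only [List.foldl_cons, List.filter_cons, h, Bool.and_true, if_true, List.map_cons,
        decide_eq_true_eq]
      rw [ih]
      congr 1
      by_cases hg : p.2 ≤ b
      · rw [if_neg (by omega), max_eq_left hg]
      · rw [if_pos (by omega), max_eq_right (by omega)]
    · have h' : PySem.Chars.startswith (t.drop i) p.1 = false := by simpa using h
      simp only [List.foldl_cons, List.filter_cons, h', Bool.and_false, Bool.false_eq_true,
        if_false]
      exact ih b

-- B's whole double loop computes the max of 0 and all matched scores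
theorem pvAlt_eq_foldl_max (job_title : String) :
    calculate_title_alignment_score_alt job_title
      = (pvMatched (PySem.Chars.lower job_title.toList)).foldl max 0 := by
  unfold calculate_title_alignment_score_alt pvMatched
  simp only [pvInner_eq_max]
  exact (List.foldl_flatMap).symm

-- membership in the matched-score list
theorem pvMem_matched (t : List Char) (x : Int) :
    x ∈ pvMatched t ↔ ∃ i < t.length, ∃ p ∈ pvKeywords,
      PySem.Chars.startswith (t.drop i) p.1 = true ∧ p.2 = x := by
  simp only [pvMatched, List.mem_flatMap, List.mem_map, List.mem_filter, List.mem_range]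
  constructor
  · rintro ⟨i, hi, p, ⟨hp, hsw⟩, hx⟩; exact ⟨i, hi, p, hp, hsw, hx⟩
  · rintro ⟨i, hi, p, hp, hsw, hx⟩; exact ⟨i, hi, p, ⟨hp, hsw⟩, hx⟩

-- a nonempty keyword starts at some position < len ↔ it is a substring
theorem pvHit_iff (kw t : List Char) (hkw : kw ≠ []) :
    (∃ i < t.length, PySem.Chars.startswith (t.drop i) kw = true)
      ↔ PySem.Chars.isIn kw t = true := by
  rw [← PySem.Chars.exists_prefix_drop_iff_isIn]
  constructor
  · rintro ⟨i, _, h⟩; exact ⟨i, (PySem.Chars.startswith_iff _ _).1 h⟩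
  · rintro ⟨j, h⟩
    by_cases hj : j < t.length
    · exact ⟨j, hj, (PySem.Chars.startswith_iff _ _).2 h⟩
    · exfalso
      rw [List.drop_eq_nil_of_le (by omega)] at h
      exact hkw (List.prefix_nil.mp h)

-- every matched score is one of the three tier values
theorem pvMatched_vals (t : List Char) (x : Int) (hx : x ∈ pvMatched t) :
    x = 25 ∨ x = 20 ∨ x = 12 := by
  rcases (pvMem_matched t x).1 hx with ⟨i, _, p, hp, _, hpx⟩
  have : ∀ q ∈ pvKeywords, q.2 = 25 ∨ q.2 = 20 ∨ q.2 = 12 := by decide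
  rcases this p hp with h|h|h <;> omega

-- a tier value is matched iff some keyword of its tier is a substring
theorem pvMem_score (t : List Char) (K : Int) :
    K ∈ pvMatched t ↔ ∃ p ∈ pvKeywords, p.2 = K ∧ PySem.Chars.isIn p.1 t = true := by
  have hne : ∀ p ∈ pvKeywords, p.1 ≠ [] := by decide
  rw [pvMem_matched]
  constructor
  · rintro ⟨i, hi, p, hp, hsw, hpx⟩
    exact ⟨p, hp, hpx, (pvHit_iff p.1 t (hne p hp)).1 ⟨i, hi, hsw⟩⟩
  · rintro ⟨p, hp, hpx, hin⟩
    rcases (pvHit_iff p.1 t (hne p hp)).2 hin with ⟨i, hi, hsw⟩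
    exact ⟨i, hi, p, hp, hsw, hpx⟩

-- A's first-hit loop over a tier list hits iff some tier keyword is a substring
theorem pvLoopHit_iff (ts : List String) (s : String) :
    pvLoopHit ts s = true ↔ ∃ kw ∈ ts, PySem.Str.isIn kw s = true := by
  induction ts with
  | nil => simp [pvLoopHit]
  | cons t rest ih =>
    by_cases h : PySem.Str.isIn t s = true <;> simp [pvLoopHit, h, ih]

-- tier bridge: K is matched iff A's loop over the tier list ts hits
theorem pvMem_tier (s : String) (ts : List String) (K : Int)
    (hfwd : ∀ p ∈ pvKeywords, p.2 = K → p.1 ∈ ts.map String.toList)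
    (hbwd : ∀ kw ∈ ts, (kw.toList, K) ∈ pvKeywords) :
    K ∈ pvMatched (PySem.Chars.lower s.toList) ↔ pvLoopHit ts (PySem.Str.lower s) = true := by
  rw [pvMem_score, pvLoopHit_iff]
  constructor
  · rintro ⟨p, hp, hpx, hin⟩
    rcases List.mem_map.1 (hfwd p hp hpx) with ⟨kw, hkw, hkwp⟩
    refine ⟨kw, hkw, ?_⟩
    rw [PySem.Str.isIn_eq, PySem.Str.toList_lower, hkwp]
    exact hin
  · rintro ⟨kw, hkw, hin⟩
    rw [PySem.Str.isIn_eq, PySem.Str.toList_lower] at hin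
    exact ⟨(kw.toList, K), hbwd kw hkw, rfl, hin⟩

theorem pvMem_25 (s : String) :
    (25 : Int) ∈ pvMatched (PySem.Chars.lower s.toList) ↔ pvLoopHit pvPrimary (PySem.Str.lower s) = true :=
  pvMem_tier s pvPrimary 25 (by decide) (by decide)

theorem pvMem_20 (s : String) :
    (20 : Int) ∈ pvMatched (PySem.Chars.lower s.toList) ↔ pvLoopHit pvSecondary (PySem.Str.lower s) = true :=
  pvMem_tier s pvSecondary 20 (by decide) (by decide)

theorem pvMem_12 (s : String) :
    (12 : Int) ∈ pvMatched (PySem.Chars.lower s.toList) ↔ pvLoopHit pvPartial (PySem.Str.lower s) = true :=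
  pvMem_tier s pvPartial 12 (by decide) (by decide)

-- ===== VERDICT (by name: the statement is the Claim_ definition above) =====
theorem calculate_title_alignment_score_spec : Claim_equal_calculate_title_alignment_score := by
  intro job_title _
  unfold Spec_calculate_title_alignment_score
  rw [pvAlt_eq_foldl_max]
  set t := PySem.Chars.lower job_title.toList with ht
  set r := (pvMatched t).foldl max 0 with hr
  have hub := PySem.List.le_foldl_max (pvMatched t) (0 : Int)
  have hmem := PySem.List.foldl_max_mem (pvMatched t) (0 : Int)
  rw [← hr] at hub hmem
  unfold calculate_title_alignment_score
  simp only []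
  by_cases h1 : pvLoopHit pvPrimary (PySem.Str.lower job_title) = true
  · have h25 : (25 : Int) ∈ pvMatched t := (pvMem_25 job_title).2 h1
    have hge := hub.2 25 h25
    have hle : r ≤ 25 := by
      rcases hmem with h | h
      · omega
      · rcases pvMatched_vals t r h with h' | h' | h' <;> omega
    simp only [h1, if_true]
    omega
  · have h25 : (25 : Int) ∉ pvMatched t := fun h => h1 ((pvMem_25 job_title).1 h)
    by_cases h2 : pvLoopHit pvSecondary (PySem.Str.lower job_title) = true
    · have h20 : (20 : Int) ∈ pvMatched t := (pvMem_20 job_title).2 h2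
      have hge := hub.2 20 h20
      have hle : r ≤ 20 := by
        rcases hmem with h | h
        · omega
        · rcases pvMatched_vals t r h with h' | h' | h'
          · exact absurd (h' ▸ h) h25
          · omega
          · omega
      simp only [h1, h2, Bool.false_eq_true, if_false, if_true]
      omega
    · have h20 : (20 : Int) ∉ pvMatched t := fun h => h2 ((pvMem_20 job_title).1 h)
      by_cases h3 : pvLoopHit pvPartial (PySem.Str.lower job_title) = true
      · have h12 : (12 : Int) ∈ pvMatched t := (pvMem_12 job_title).2 h3
        have hge := hub.2 12 h12
        have hle : r ≤ 12 := by
          rcases hmem with h | h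
          · omega
          · rcases pvMatched_vals t r h with h' | h' | h'
            · exact absurd (h' ▸ h) h25
            · exact absurd (h' ▸ h) h20
            · omega
        simp [h1, h2, h3]
        omega
      · have h12 : (12 : Int) ∉ pvMatched t := fun h => h3 ((pvMem_12 job_title).1 h)
        have : r = 0 := by
          rcases hmem with h | h
          · exact h
          · rcases pvMatched_vals t r h with h' | h' | h'
            · exact absurd (h' ▸ h) h25
            · exact absurd (h' ▸ h) h20
            · exact absurd (h' ▸ h) h12
        simp [h1, h2, h3]
        omega
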